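-- pv_equiv track=rewrite | github.com/ddl-matthew-tendler/access_review | chat.py | _volumes_by_names
-- ===== SOURCE A (Python) =====
-- from typing import Any, Dict, List, Optional, Tuple
--
-- def _norm(s: Optional[str]) -> str:
--     return (s or "").strip().lower()
--
-- def _volumes_by_names(snap: Dict, names: List[str]) -> Tuple[List[Dict], List[str]]:
--     found, missing = [], []
--     for raw in names:
--         n = _norm(raw)
--         match = next((v for v in snap.get("volumes", [])
--                       if _norm(v.get("name")) == n or _norm(v.get("id")) == n), None)
--         if match:
--             found.append(match)
--         else:
--             missing.append(raw)
--     return found, missing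
-- ===== SOURCE B (Python) =====
-- def _norm(s):
--     return (s or "").strip().lower()
--
-- def _volumes_by_names(snap, names):
--     # Build a one-pass index: normalized name/id -> earliest matching volume.
--     index = {}
--     for v in snap.get("volumes", []):
--         index.setdefault(_norm(v.get("name")), v)
--         index.setdefault(_norm(v.get("id")), v)
--     found, missing = [], []
--     for raw in names:
--         match = index.get(_norm(raw))
--         if match:
--             found.append(match)
--         else:
--             missing.append(raw)
--     return found, missing
-- ===== Notes on version B (the rewrite author's own statement) =====
-- stated objective: faster
-- what changed: Replaces the per-name linear scan over volumes by a dict built once (normalized name/id -> earliest volume via setdefault) with O(1) lookups per name.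
import Mathlib
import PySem

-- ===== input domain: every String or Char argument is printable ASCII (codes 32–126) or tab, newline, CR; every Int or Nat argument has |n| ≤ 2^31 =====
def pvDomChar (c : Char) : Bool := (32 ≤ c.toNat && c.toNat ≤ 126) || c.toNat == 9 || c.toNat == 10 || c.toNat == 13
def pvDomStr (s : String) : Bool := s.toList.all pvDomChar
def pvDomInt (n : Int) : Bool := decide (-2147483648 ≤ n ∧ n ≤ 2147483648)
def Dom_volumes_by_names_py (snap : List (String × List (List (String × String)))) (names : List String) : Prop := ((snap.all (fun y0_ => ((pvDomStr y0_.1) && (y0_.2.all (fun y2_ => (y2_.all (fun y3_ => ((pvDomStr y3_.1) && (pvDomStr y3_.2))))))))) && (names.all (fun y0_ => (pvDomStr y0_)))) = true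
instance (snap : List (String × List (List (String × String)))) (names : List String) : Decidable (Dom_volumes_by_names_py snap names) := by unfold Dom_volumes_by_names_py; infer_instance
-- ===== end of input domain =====

-- B builds the normalized name/id -> earliest-volume dict once and looks names up in it (asymptotically faster than A's scan per name); equivalence of the returned value is proved.

-- shared module helper _norm(s) = (s or "").strip().lower()
def pvNorm (s : Option String) : String :=
  PySem.Str.lower (PySem.Str.strip (s.getD ""))

-- assoc-list first-match lookup (Python dict .get)
def pvAget? {α : Type} (d : List (String × α)) (k : String) : Option α :=
  (d.find? (fun kv => kv.1 == k)).map (·.2)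

-- ===== PORT A =====
def volumes_by_names_py (snap : List (String × List (List (String × String)))) (names : List String) : (List (List (String × String))) × List String :=
  let volumes := (pvAget? snap "volumes").getD []
  names.foldl (fun acc raw =>
    let n := pvNorm (some raw)
    match volumes.find? (fun v => pvNorm (pvAget? v "name") == n || pvNorm (pvAget? v "id") == n) with
    | some v => if v.isEmpty then (acc.1, acc.2 ++ [raw]) else (acc.1 ++ [v], acc.2)
    | none => (acc.1, acc.2 ++ [raw])) ([], [])

-- ===== PORT B =====
-- index = {}; for v in volumes: index.setdefault(_norm(v.get("name")), v); index.setdefault(_norm(v.get("id")), v)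
def pvBuildIndex (volumes : List (List (String × String))) : PySem.Dict String (List (String × String)) :=
  volumes.foldl (fun idx v =>
    (idx.setdefault (pvNorm (pvAget? v "name")) v).setdefault (pvNorm (pvAget? v "id")) v)
    PySem.Dict.empty

def volumes_by_names_py_alt (snap : List (String × List (List (String × String)))) (names : List String) : (List (List (String × String))) × List String :=
  let volumes := (pvAget? snap "volumes").getD []
  let index := pvBuildIndex volumes
  names.foldl (fun acc raw =>
    match index.get? (pvNorm (some raw)) with
    | some v => if v.isEmpty then (acc.1, acc.2 ++ [raw]) else (acc.1 ++ [v], acc.2)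
    | none => (acc.1, acc.2 ++ [raw])) ([], [])

-- ===== PRECONDITION & SPEC =====
def Spec_volumes_by_names_py (snap : List (String × List (List (String × String)))) (names : List String) (out : (List (List (String × String))) × List String) : Prop := out = volumes_by_names_py_alt snap names
instance (snap : List (String × List (List (String × String)))) (names : List String) (out : (List (List (String × String))) × List String) : Decidable (Spec_volumes_by_names_py snap names out) := by unfold Spec_volumes_by_names_py; infer_instance

-- ===== CLAIM (what is proved, stated in full; the proofs are below) =====
def Claim_equal_volumes_by_names_py : Prop := ∀ (snap : List (String × List (List (String × String)))) (names : List String), Dom_volumes_by_names_py snap names → Spec_volumes_by_names_py snap names (volumes_by_names_py snap names)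

-- ===== LEMMAS AND PROOFS =====

-- setdefault never overwrites, so a lookup in the built index is the first match in the volume list.
lemma buildIndex_get_aux (vs : List (List (String × String)))
    (idx : PySem.Dict String (List (String × String))) (n : String) :
    (vs.foldl (fun idx v =>
      (idx.setdefault (pvNorm (pvAget? v "name")) v).setdefault (pvNorm (pvAget? v "id")) v) idx).get? n
    = (idx.get? n).or
        (vs.find? (fun v => pvNorm (pvAget? v "name") == n || pvNorm (pvAget? v "id") == n)) := by
  induction vs generalizing idx with
  | nil => simp
  | cons v vs ih =>
    simp only [List.foldl_cons, List.find?_cons, ih]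
    by_cases hid : pvNorm (pvAget? v "id") = n
    · have h1 : ((idx.setdefault (pvNorm (pvAget? v "name")) v).setdefault (pvNorm (pvAget? v "id")) v).get? n
          = some (((idx.setdefault (pvNorm (pvAget? v "name")) v).get? n).getD v) := by
        rw [hid]; exact PySem.Dict.get?_setdefault_self _ _ _
      rw [h1]
      have hpred : (pvNorm (pvAget? v "name") == n || pvNorm (pvAget? v "id") == n) = true := by
        simp [hid]
      rw [hpred]
      by_cases hnm : pvNorm (pvAget? v "name") = n
      · rw [hnm, PySem.Dict.get?_setdefault_self]
        cases idx.get? n <;> simp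
      · rw [PySem.Dict.get?_setdefault_of_ne _ _ (fun h => hnm h.symm)]
        cases idx.get? n <;> simp
    · rw [PySem.Dict.get?_setdefault_of_ne _ _ (fun h => hid h.symm)]
      by_cases hnm : pvNorm (pvAget? v "name") = n
      · have hpred : (pvNorm (pvAget? v "name") == n || pvNorm (pvAget? v "id") == n) = true := by
          simp [hnm]
        rw [hpred, hnm, PySem.Dict.get?_setdefault_self]
        cases idx.get? n <;> simp
      · have hpred : (pvNorm (pvAget? v "name") == n || pvNorm (pvAget? v "id") == n) = false := by
          simp [hnm, hid]
        rw [hpred, PySem.Dict.get?_setdefault_of_ne _ _ (fun h => hnm h.symm)]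

lemma buildIndex_get (vs : List (List (String × String))) (n : String) :
    (pvBuildIndex vs).get? n
    = vs.find? (fun v => pvNorm (pvAget? v "name") == n || pvNorm (pvAget? v "id") == n) := by
  rw [pvBuildIndex, buildIndex_get_aux]
  simp [PySem.Dict.empty, PySem.Dict.get?]

-- ===== VERDICT (by name: the statement is the Claim_ definition above) =====
theorem volumes_by_names_py_spec : Claim_equal_volumes_by_names_py := by
  intro snap names _
  unfold Spec_volumes_by_names_py volumes_by_names_py volumes_by_names_py_alt
  simp only [buildIndex_get]
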